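/-
  THE CONTRACTS OF libc's HEAP SORT (c/libc.c; design/CONTRACTS.md entries 77, 80, 81; design/I6.md §6; DECISIONS D-6 / O-2):
  `swap_bytes`, `sift_down`, `qsort`. `Spec`s over the shadow layer only.

  WHAT IS PROMISED (D-6): safety and termination WHATEVER the comparison function returns, the footprint (only the array is
  written), no shadow byte written, and RECORD-PRESERVATION in the weak form — every output record equals SOME input record
  (`RecordsKept`). No sortedness, not even "a permutation".

      RecordsKept mem mem' base w n      every one of the `n` records of `w` bytes at `base` in `mem'` equals some record of `mem`
                                         (`refl`, `trans`, `of_eqOn`, `of_swap`, `of_swap_bytes`, `extend`, `extend_same`;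
                                         `toNat_record_addr`: the address `k * w + base` of a record, as a number)
      cmpSpec T others frames w            THE CONTRACT OF A COMPARISON FUNCTION, as `qsort` needs it: called with two live records
                                         of `w` bytes it returns (with ANY eax), writes nothing but its own 48 bytes of stack, and
                                         writes no shadow byte
      CmpSpec T Lay μ u₀ others frames cmp w
                                         the function at the address `cmp` satisfies it (`.calls : Calls … cmp (cmpSpec others
                                         frames w)`), and `cmp` is below 1 GB (`.lt`: stepping `call rax` needs a canonical target).
                                         THE PREMISE of the contracts of `sift_down` and `qsort` (farm/mkstatement.py: PREMISES);
                                         `CmpSpec.of_calls`: from the function's own contract (`uint32_compare`, `point_compare`)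

  THE INDIRECT CALL. `sift_down` spills `r8` (the comparison function) at `[rsp + 8]` of its own frame and calls it twice per
  round by `mov rax, [rsp + 8] ; call rax`. The entry address is a GHOST of the two Specs (`cmp : Word`; the pre says `r8 = cmp`,
  for `qsort`: `rcx = cmp`), and so is the record width `w` (the pre says `rcx = w`, for `qsort`: `rdx = w`), because the
  premise `CmpSpec … cmp w` is stated outside the Spec, about these two ghosts.

  THE INDIRECT CALL IN A PROOF (tested on the first round of `sift_down`, both calls: scratch/Sift2.lean):
    1. `intro Lay hLay μ hμ u₀ hcode hswap others frames cmp w hcmp u ret he hpre`, `v_entry he`, the pre opened (`hr8 : u.reg .r8 =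
       cmp` …), and `have hlt := hcmp.lt` BEFORE the walk: stepping `call rax` asks `side_canonical : cmp < 1073741824`.
    2. `u_walk hcode [hμ.vendor] until [L.sift_down.loop1, L.swap_bytes.entry] span [L.textLo, L.textHi] side (v_side)` stops
       after the `call rax` at `s_10133d` with `w_rip : s_10133d.rip = cmp` (RIP is not a literal; the load of `[rsp + 8]` was read
       through the store of r8 and rewritten by `hr8`).
    3. `u_call hcmp.calls at 0x10133d side (v_side)` (UserX/CallAt.lean) does there what `u_walk` does at a direct call: it leaves
       `call_inv` (`v_inv`), `pre_10133d`, and the goal at the returned state `s_10133dr` (`w_rip` = the literal 10133FH, `w_rsp`,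
       `w_kept`, `w_rbx` … `w_r15`, `w_same`, `w_code`, `w_inv`, `w_post`; the entry state's `w_mem_10133d`, `w_rsp_10133d` … stay).
    4. `pre_10133d`: `⟨⟨?_, hsh.offText⟩, hlive.sub _ _ ?_ ?_, hlive.sub _ _ ?_ ?_⟩`; the layer: `(hsh.inv.untouched hun).lower …`
       (`hun : ShadowUntouched u.mem s_10133d.mem := by v_untouched`, or from the loop invariant), `top' = rsp − 72`.
    5. at `s_10133dr`: `have w_eq := ProgX.conv_code_eqOn w_code`; every stack slot the rest of the walk reads (`[rsp − 64]` = cmp,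
       the six saved registers, the return address) through the callee's footprint:
       `simp only [X86.User.Spec.footprint, vspec, w_rsp_10133d] at w_same` once, then `have … := by u_frame hslot` per slot;
       the array: `w_same.eqOn` / `RecordsKept.of_eqOn`. Then `u_walk` again. `swap_bytes` (a direct call): the cut point
       `L.swap_bytes.entry` stops the walk at its entry, `u_call (hswap others frames) at 0x10134c side (v_side)` applies it (so
       that the entry state's registers, which the post and the footprint are about, stay), `RecordsKept.of_swap_bytes`.
       (Rename `w_same`, `w_post` of one call before the next: the names are reused.)

      function     own frame                          callees (largest frame)                          frame
      swap_bytes   6 pushes + sub rsp 18H = 72        __asan_load1_noabort (16)               72 + 8 + 16 =  96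
      sift_down    6 pushes + sub rsp 18H = 72        swap_bytes (96), cmp (48)                   72 + 8 + 96 = 176
      qsort        5 pushes = 40                      sift_down (176), swap_bytes (96)           40 + 8 + 176 = 224
  (The entry numbers "CONTRACTS n" are those of proofs.vorbis/design/CONTRACTS.md, where these contracts were first written.)
-/
import ProgX.Spec.Basic
namespace ProgX.Spec
open X86 X86.User Asan

/-! ### Record-preservation -/

/-- **Record-preservation, weak form** (the post of `qsort`, `sift_down`; DECISIONS D-6): every one of the `n` records of `w`
bytes at `base` in `mem'` equals SOME record of `mem`, byte for byte. No sortedness, not even that it is a permutation.  -/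
def RecordsKept (mem mem' : Mem) (base w n : Nat) : Prop :=
  ∀ k, k < n → ∃ k', k' < n ∧ ∀ b, b < w →
    mem'.readLE (UInt64.ofNat (base + w * k + b)) 1 = mem.readLE (UInt64.ofNat (base + w * k' + b)) 1

namespace RecordsKept
variable {mem mem' mem'' : Mem} {base w n : Nat}

/-- Nothing moved. -/
theorem refl (mem : Mem) (base w n : Nat) : RecordsKept mem mem base w n :=
  fun k hk => ⟨k, hk, fun _ _ => rfl⟩

/-- Two rearrangements, one after the other. -/
theorem trans (h1 : RecordsKept mem mem' base w n) (h2 : RecordsKept mem' mem'' base w n) :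
    RecordsKept mem mem'' base w n := by
  intro k hk
  obtain ⟨k1, hk1, e1⟩ := h2 k hk
  obtain ⟨k2, hk2, e2⟩ := h1 k1 hk1
  exact ⟨k2, hk2, fun b hb => (e1 b hb).trans (e2 b hb)⟩

/-- The address of byte `b` of record `k` is a number below 2^64: the value of its word. -/
theorem toNat_byte {k b : Nat} (hk : k < n) (hb : b < w) (hlt : base + w * n < 2 ^ 64) :
    (UInt64.ofNat (base + w * k + b)).toNat = base + w * k + b := by
  have h1 : w * (k + 1) ≤ w * n := Nat.mul_le_mul_left w hk
  rw [Nat.mul_succ] at h1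
  exact Code.toNat_ofNat_lt _ (by omega)

/-- Two different records do not meet: record `k` ends at or before record `i`, or begins at or after its end. -/
theorem records_apart {k i : Nat} (hki : k ≠ i) : w * k + w ≤ w * i ∨ w * i + w ≤ w * k := by
  rcases Nat.lt_or_gt_of_ne hki with h | h
  · have h1 : w * (k + 1) ≤ w * i := Nat.mul_le_mul_left w h
    rw [Nat.mul_succ] at h1
    exact Or.inl h1
  · have h1 : w * (i + 1) ≤ w * k := Nat.mul_le_mul_left w h
    rw [Nat.mul_succ] at h1
    exact Or.inr h1

/-- The array was not written (a call of the comparison function, pushes …): every record is where it was. -/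
theorem of_eqOn (hlt : base + w * n < 2 ^ 64) (h : Mem.EqOn base (base + w * n) mem mem') :
    RecordsKept mem mem' base w n := by
  intro k hk
  refine ⟨k, hk, ?_⟩
  intro b hb
  have e := toNat_byte (base := base) hk hb hlt
  have h1 : w * (k + 1) ≤ w * n := Nat.mul_le_mul_left w hk
  rw [Nat.mul_succ] at h1
  exact h.readLE _ 1 (by omega) (by omega) (by omega)

/-- **Two records exchanged, the others kept**: what one `swap_bytes` does to an array. -/
theorem of_swap {i j : Nat} (hi : i < n) (hj : j < n)
    (hij : ∀ b, b < w →
      mem'.readLE (UInt64.ofNat (base + w * i + b)) 1 = mem.readLE (UInt64.ofNat (base + w * j + b)) 1)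
    (hji : ∀ b, b < w →
      mem'.readLE (UInt64.ofNat (base + w * j + b)) 1 = mem.readLE (UInt64.ofNat (base + w * i + b)) 1)
    (hrest : ∀ k, k < n → k ≠ i → k ≠ j → ∀ b, b < w →
      mem'.readLE (UInt64.ofNat (base + w * k + b)) 1 = mem.readLE (UInt64.ofNat (base + w * k + b)) 1) :
    RecordsKept mem mem' base w n := by
  intro k hk
  by_cases hki : k = i
  · subst hki
    exact ⟨j, hj, hij⟩
  · by_cases hkj : k = j
    · subst hkj
      exact ⟨i, hi, hji⟩
    · exact ⟨k, hk, hrest k hk hki hkj⟩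

/-- A pointer `a` whose value is the number `x`, advanced by `t` bytes: the word of `x + t`. (How the post of `swap_bytes`,
stated with pointers, meets `RecordsKept`, stated with numbers.) -/
theorem word_add_ofNat {a : Word} {x : Nat} (ha : a.toNat = x) (t : Nat) :
    a + UInt64.ofNat t = UInt64.ofNat (x + t) := by
  rw [← ha, UInt64.ofNat_add, UInt64.ofNat_toNat]

/-- **The address of record `k`, as the code computes it** (`imul rbx, r13 ; add rbx, r14`: `k * w + base` on words) is the
number `base + w · k` — no wrap-around — for a record of the array (`k < n`, the array ends below 2^64). The product of two
variables is not linear arithmetic: this is the one place where it is unfolded. -/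
theorem toNat_record_addr (base k wW : Word) {w n : Nat} (hw : wW.toNat = w) (hk : k.toNat < n)
    (hlt : base.toNat + w * n < 2 ^ 64) : (k * wW + base).toNat = base.toNat + w * k.toNat := by
  have h1 : w * (k.toNat + 1) ≤ w * n := Nat.mul_le_mul_left w hk
  rw [Nat.mul_succ] at h1
  have h2 : (k * wW).toNat = w * k.toNat := by
    rw [UInt64.toNat_mul, hw, Nat.mul_comm]
    exact Nat.mod_eq_of_lt (by omega)
  rw [UInt64.toNat_add, h2]
  have h3 : (w * k.toNat + base.toNat) % 2 ^ 64 = w * k.toNat + base.toNat := Nat.mod_eq_of_lt (by omega)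
  omega

/-- **`RecordsKept` from the returned state of `swap_bytes(a, b, w)`**: `a`, `b` are records `i`, `j` of the array; `hab`, `hba`
are the two halves of `swap_bytes.spec`'s post; `hsame` is `Returned.same` (the footprint: the callee's stack `fr` and the two
records), and the callee's stack does not meet the array. -/
theorem of_swap_bytes {i j : Nat} {a b : Word} {fr : Span} (hi : i < n) (hj : j < n)
    (ha : a.toNat = base + w * i) (hb : b.toNat = base + w * j) (hlt : base + w * n < 2 ^ 64)
    (hab : ∀ t, t < w → mem'.readLE (a + UInt64.ofNat t) 1 = mem.readLE (b + UInt64.ofNat t) 1)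
    (hba : ∀ t, t < w → mem'.readLE (b + UInt64.ofNat t) 1 = mem.readLE (a + UInt64.ofNat t) 1)
    (hsame : Mem.SameExcept [fr, ⟨a.toNat, a.toNat + w⟩, ⟨b.toNat, b.toNat + w⟩] mem mem')
    (hfr : fr.hi ≤ base ∨ base + w * n ≤ fr.lo) : RecordsKept mem mem' base w n := by
  apply of_swap hi hj
  · intro t ht
    rw [← word_add_ofNat ha t, ← word_add_ofNat hb t]
    exact hab t ht
  · intro t ht
    rw [← word_add_ofNat ha t, ← word_add_ofNat hb t]
    exact hba t ht
  · intro k hk hki hkj t ht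
    have e := toNat_byte (base := base) hk ht hlt
    have h1 : w * (k + 1) ≤ w * n := Nat.mul_le_mul_left w hk
    rw [Nat.mul_succ] at h1
    have hi' := records_apart (w := w) hki
    have hj' := records_apart (w := w) hkj
    apply hsame.readLE _ 1 (by omega)
    intro s hs
    simp only [List.mem_cons, List.not_mem_nil, or_false] at hs
    rcases hs with rfl | rfl | rfl
    · rw [e]
      omega
    · show _ ≤ a.toNat ∨ a.toNat + w ≤ _
      rw [e, ha]
      omega
    · show _ ≤ b.toNat ∨ b.toNat + w ≤ _
      rw [e, hb]
      omega

/-- **From the first `m` records to all `n`**: the records `m ≤ k < n` were not touched (`sift_down(base, 0, end)` inside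
`qsort`'s second loop works on the first `end` records only). -/
theorem extend {m : Nat} (h : RecordsKept mem mem' base w m) (hmn : m ≤ n)
    (hrest : ∀ k, m ≤ k → k < n → ∀ b, b < w →
      mem'.readLE (UInt64.ofNat (base + w * k + b)) 1 = mem.readLE (UInt64.ofNat (base + w * k + b)) 1) :
    RecordsKept mem mem' base w n := by
  intro k hk
  by_cases hkm : k < m
  · obtain ⟨k', hk', e⟩ := h k hkm
    exact ⟨k', by omega, e⟩
  · exact ⟨k, hk, hrest k (by omega) hk⟩

/-- The same, with "not touched" read off the footprint of the call (`Returned.same` of `sift_down(base, 0, m)`: its stack `fr`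
and the first `m` records), the callee's stack not meeting the array. -/
theorem extend_same {m : Nat} {fr : Span} (h : RecordsKept mem mem' base w m) (hmn : m ≤ n) (hlt : base + w * n < 2 ^ 64)
    (hsame : Mem.SameExcept [fr, ⟨base, base + w * m⟩] mem mem') (hfr : fr.hi ≤ base ∨ base + w * n ≤ fr.lo) :
    RecordsKept mem mem' base w n := by
  apply h.extend hmn
  intro k hmk hk b hb
  have e := toNat_byte (base := base) hk hb hlt
  have h1 : w * (k + 1) ≤ w * n := Nat.mul_le_mul_left w hk
  rw [Nat.mul_succ] at h1
  have h2 : w * m ≤ w * k := Nat.mul_le_mul_left w hmk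
  apply hsame.readLE _ 1 (by omega)
  intro s hs
  simp only [List.mem_cons, List.not_mem_nil, or_false] at hs
  rcases hs with rfl | rfl
  · rw [e]
    omega
  · show _ ≤ base ∨ base + w * m ≤ _
    rw [e]
    omega

end RecordsKept

/-! ### The comparison function -/

/-- **The contract of a comparison function** `cmp(rdi = p, rsi = q)`, as the heap sort needs it (I6 §6 "CmpSpec"): the two
records of `w` bytes at `p` and at `q` each lie inside one live object. It RETURNS — with any eax: the result only selects a
branch of `sift_down` —, writes nothing but its own stack (48 bytes: `uint32_compare` and `point_compare` both push two
registers, `sub rsp, 8`, and call a check routine: 24 + 8 + 16), and writes no shadow byte. (That it keeps rbx rbp r12–r15 and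
returns to its caller is part of every contract: `Returned`.) -/
def cmpSpec (T : Text) (others : List Obj) (frames : List (Nat × FrameLayout)) (w : Nat) : Spec where
  pre u :=
    ShadowPre T others frames u ∧
    LiveIn others frames (u.reg .rdi).toNat w ∧
    LiveIn others frames (u.reg .rsi).toNat w
  post u v :=
    ShadowUntouched u.mem v.mem
  frame := 48
  writes _ := []

@[vspec] theorem cmpSpec_frame (T : Text) (others : List Obj) (frames : List (Nat × FrameLayout)) (w : Nat) :
    (cmpSpec T others frames w).frame = 48 := id rfl

@[vspec] theorem cmpSpec_writes (T : Text) (others : List Obj) (frames : List (Nat × FrameLayout)) (w : Nat) (u : State) :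
    (cmpSpec T others frames w).writes u = [] := id rfl

/-- **`CmpSpec`: the function at the address `cmp` is a comparison function for records of `w` bytes** — the premise of the
contracts of `sift_down` and `qsort`.
`lt`: the address is canonical for the flat machine (below 1 GB, as every address of the image's code: for a label,
`by decide`) — what stepping the indirect `call rax` asks for (the walker's side goal `side_canonical`).
`calls`: the function satisfies `cmpSpec` — a `Calls` hypothesis whose entry is the VARIABLE `cmp`: at the state after the
`call rax` (`w_rip : s.rip = cmp`) it is applied by `u_call` (UserX/CallAt.lean; the recipe: this file's header). -/
structure CmpSpec (T : Text) (Lay : Layout) (μ : Microarch) (u₀ : State) (others : List Obj) (frames : List (Nat × FrameLayout))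
    (cmp : Word) (w : Nat) : Prop where
  lt : cmp < 0x40000000
  calls : Calls Lay μ (WayInv T) (conv T u₀) cmp (cmpSpec T others frames w)

/-- **How a caller of `qsort` gets the premise**: from the contract `s` of the function it passes (`uint32_compare`,
`point_compare`: two live records of 4 bytes are what their pre asks for; their post says `ShadowUntouched`; 48 bytes of stack;
no window), and its address (a label: `hlt` is `by decide`). -/
theorem CmpSpec.of_calls {T : Text} {Lay : Layout} {μ : Microarch} {u₀ : State} {others : List Obj} {frames : List (Nat × FrameLayout)}
    {cmp : Word} {w : Nat} {s : Spec} (hlt : cmp < 0x40000000) (hc : Calls Lay μ (WayInv T) (conv T u₀) cmp s)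
    (hpre : ∀ u, (cmpSpec T others frames w).pre u → s.pre u)
    (hpost : ∀ u v, (cmpSpec T others frames w).pre u → s.post u v → ShadowUntouched u.mem v.mem)
    (hframe : s.frame ≤ 48) (hwrites : ∀ u, s.writes u = []) : CmpSpec T Lay μ u₀ others frames cmp w := by
  refine ⟨hlt, Calls.weaken hc hpre hpost hframe ?_⟩
  intro u _ x hx
  rw [hwrites u] at hx
  exact absurd hx List.not_mem_nil

/-! ### The three functions -/

/-- **`swap_bytes(rdi = a, rsi = b, rdx = w)`** (CONTRACTS 77): the `w` bytes at `a` and the `w` bytes at `b` each lie inside one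
live object, and the two ranges DO NOT MEET (true at its three call sites: two different records of one array; with a partial
overlap the post would be false). The two ranges are exchanged byte by byte: afterwards `a[i]` is the old `b[i]` and `b[i]` the
old `a[i]`. Nothing else is written but its own 96 bytes of stack (six pushes, `sub rsp, 18H` — `b` is spilled at `[rsp + 8]` —,
the return address of its check calls, that routine's worst case); no shadow byte is written. -/
def swap_bytes.spec (T : Text) (others : List Obj) (frames : List (Nat × FrameLayout)) : Spec where
  pre u :=
    ShadowPre T others frames u ∧
    LiveIn others frames (u.reg .rdi).toNat (u.reg .rdx).toNat ∧
    LiveIn others frames (u.reg .rsi).toNat (u.reg .rdx).toNat ∧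
    ((u.reg .rdi).toNat + (u.reg .rdx).toNat ≤ (u.reg .rsi).toNat ∨
     (u.reg .rsi).toNat + (u.reg .rdx).toNat ≤ (u.reg .rdi).toNat)
  post u v :=
    ShadowUntouched u.mem v.mem ∧
    (∀ i, i < (u.reg .rdx).toNat →
      v.mem.readLE (u.reg .rdi + UInt64.ofNat i) 1 = u.mem.readLE (u.reg .rsi + UInt64.ofNat i) 1) ∧
    (∀ i, i < (u.reg .rdx).toNat →
      v.mem.readLE (u.reg .rsi + UInt64.ofNat i) 1 = u.mem.readLE (u.reg .rdi + UInt64.ofNat i) 1)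
  frame := 96
  writes u :=
    [⟨(u.reg .rdi).toNat, (u.reg .rdi).toNat + (u.reg .rdx).toNat⟩,
     ⟨(u.reg .rsi).toNat, (u.reg .rsi).toNat + (u.reg .rdx).toNat⟩]

@[vspec] theorem swap_bytes.spec_frame (T : Text) (others : List Obj) (frames : List (Nat × FrameLayout)) :
    (swap_bytes.spec T others frames).frame = 96 := id rfl

@[vspec] theorem swap_bytes.spec_writes (T : Text) (others : List Obj) (frames : List (Nat × FrameLayout)) (u : State) :
    (swap_bytes.spec T others frames).writes u =
      [⟨(u.reg .rdi).toNat, (u.reg .rdi).toNat + (u.reg .rdx).toNat⟩,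
       ⟨(u.reg .rsi).toNat, (u.reg .rsi).toNat + (u.reg .rdx).toNat⟩] := id rfl

/-- **`sift_down(rdi = base, rsi = root, rdx = end, rcx = w, r8 = cmp)`** (CONTRACTS 80), under the premise
`CmpSpec … cmp w`: the ghosts `cmp` and `w` are the values of r8 and rcx; `w ≥ 1`; `root ≤ end`; the `end` records of `w` bytes
at `base` lie inside one live object, and `w · end < 2^63` (every index is `≤ 2·end`, every address `base + w·k` with `k < end`:
no computation wraps).
It returns WHATEVER the comparison function answers (measure `end − root`: the new root is `2·root + 1` or `2·root + 2`, both
tested `< end`), every record afterwards equals some record before (`RecordsKept`: the only stores are those of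
`swap_bytes(base + w·root, base + w·child, w)`, `root < child < end`), and nothing is written but the array and its own 176
bytes of stack (six pushes, `sub rsp, 18H`, a return address, `swap_bytes`' 96 — the comparison function's 48 are less); no
shadow byte is written. -/
def sift_down.spec (T : Text) (others : List Obj) (frames : List (Nat × FrameLayout)) (cmp : Word) (w : Nat) : Spec where
  pre u :=
    ShadowPre T others frames u ∧
    u.reg .r8 = cmp ∧
    (u.reg .rcx).toNat = w ∧
    0 < w ∧
    (u.reg .rsi).toNat ≤ (u.reg .rdx).toNat ∧
    w * (u.reg .rdx).toNat < 2 ^ 63 ∧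
    LiveIn others frames (u.reg .rdi).toNat (w * (u.reg .rdx).toNat)
  post u v :=
    ShadowUntouched u.mem v.mem ∧
    RecordsKept u.mem v.mem (u.reg .rdi).toNat w (u.reg .rdx).toNat
  frame := 176
  writes u := [⟨(u.reg .rdi).toNat, (u.reg .rdi).toNat + w * (u.reg .rdx).toNat⟩]

@[vspec] theorem sift_down.spec_frame (T : Text) (others : List Obj) (frames : List (Nat × FrameLayout)) (cmp : Word) (w : Nat) :
    (sift_down.spec T others frames cmp w).frame = 176 := id rfl

@[vspec] theorem sift_down.spec_writes (T : Text) (others : List Obj) (frames : List (Nat × FrameLayout)) (cmp : Word) (w : Nat)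
    (u : State) :
    (sift_down.spec T others frames cmp w).writes u =
      [⟨(u.reg .rdi).toNat, (u.reg .rdi).toNat + w * (u.reg .rdx).toNat⟩] := id rfl

/-- **`qsort(rdi = base, rsi = n, rdx = w, rcx = cmp)`** (CONTRACTS 81), under the premise `CmpSpec … cmp w`: `n < 2` (it
returns at once: `cmp rsi, 1 ; jbe`), or the ghosts `cmp` and `w` are the values of rcx and rdx, `w ≥ 1`, the `n` records of
`w` bytes at `base` lie inside one live object and `w · n < 2^63`.
A heap sort: `sift_down(base, i − 1, n)` for `i = n/2 … 1`, then `swap_bytes(base, base + w·end, w) ; sift_down(base, 0, end)`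
for `end = n − 1 … 1`. It returns whatever the comparison function answers (both counters decrease to 0), every record
afterwards equals some record before (`RecordsKept`; sortedness is NOT promised), and nothing is written but the array and its
own 224 bytes of stack (five pushes, a return address, `sift_down`'s 176); no shadow byte is written. -/
def qsort.spec (T : Text) (others : List Obj) (frames : List (Nat × FrameLayout)) (cmp : Word) (w : Nat) : Spec where
  pre u :=
    ShadowPre T others frames u ∧
    ((u.reg .rsi).toNat < 2 ∨
      (u.reg .rcx = cmp ∧
       (u.reg .rdx).toNat = w ∧
       0 < w ∧
       w * (u.reg .rsi).toNat < 2 ^ 63 ∧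
       LiveIn others frames (u.reg .rdi).toNat (w * (u.reg .rsi).toNat)))
  post u v :=
    ShadowUntouched u.mem v.mem ∧
    RecordsKept u.mem v.mem (u.reg .rdi).toNat w (u.reg .rsi).toNat
  frame := 224
  writes u := [⟨(u.reg .rdi).toNat, (u.reg .rdi).toNat + w * (u.reg .rsi).toNat⟩]

@[vspec] theorem qsort.spec_frame (T : Text) (others : List Obj) (frames : List (Nat × FrameLayout)) (cmp : Word) (w : Nat) :
    (qsort.spec T others frames cmp w).frame = 224 := id rfl

@[vspec] theorem qsort.spec_writes (T : Text) (others : List Obj) (frames : List (Nat × FrameLayout)) (cmp : Word) (w : Nat)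
    (u : State) :
    (qsort.spec T others frames cmp w).writes u =
      [⟨(u.reg .rdi).toNat, (u.reg .rdi).toNat + w * (u.reg .rsi).toNat⟩] := id rfl

end ProgX.Spec
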